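-- pv_equiv track=rewrite | github.com/nandan-spec/Personalized_Profile_snooplay | app_fast.py | overlapping_age_bands
-- ===== SOURCE A (Python) =====
-- from typing import List, Dict, Any, Optional, Union
--
-- def overlapping_age_bands(p: dict) -> List[str]:
--     amin = p.get("age_min"); amax = p.get("age_max")
--     if amin is None and amax is None: return []
--     try:
--         amin = int(0 if amin is None else amin); amax = int(amax if amax is not None else amin)
--     except Exception:
--         return []
--     if amax < amin: amin, amax = amax, amin
--     bands = {"0-2 yr": (0,2), "3-5 yr": (3,5), "6-8 yr": (6,8), "9-11 yr": (9,11)}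
--     out=[]
--     for k,(lo,hi) in bands.items():
--         if not (amax < lo or amin > hi): out.append(k)
--     return out
-- ===== SOURCE B (Python) =====
-- from typing import List
--
-- def overlapping_age_bands(p: dict) -> List[str]:
--     amin = p.get("age_min"); amax = p.get("age_max")
--     if amin is None and amax is None: return []
--     try:
--         amin = int(0 if amin is None else amin); amax = int(amax if amax is not None else amin)
--     except Exception:
--         return []
--     if amax < amin: amin, amax = amax, amin
--     names = ["0-2 yr", "3-5 yr", "6-8 yr", "9-11 yr"]
--     lo_idx = max(0, -(-(amin - 2) // 3))      # lowest band index i with 3*i + 2 >= amin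
--     hi_idx = min(3, amax // 3)                # highest band index i with 3*i <= amax
--     return names[lo_idx:hi_idx + 1] if lo_idx <= hi_idx else []
-- ===== Notes on version B (the rewrite author's own statement) =====
-- stated objective: alternative
-- what changed: Replaces A's per-band overlap scan over the band dict with closed-form index arithmetic: ceiling division gives the lowest overlapping band index, floor division the highest, and the result is one slice of the ordered band-name list.
import Mathlib
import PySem

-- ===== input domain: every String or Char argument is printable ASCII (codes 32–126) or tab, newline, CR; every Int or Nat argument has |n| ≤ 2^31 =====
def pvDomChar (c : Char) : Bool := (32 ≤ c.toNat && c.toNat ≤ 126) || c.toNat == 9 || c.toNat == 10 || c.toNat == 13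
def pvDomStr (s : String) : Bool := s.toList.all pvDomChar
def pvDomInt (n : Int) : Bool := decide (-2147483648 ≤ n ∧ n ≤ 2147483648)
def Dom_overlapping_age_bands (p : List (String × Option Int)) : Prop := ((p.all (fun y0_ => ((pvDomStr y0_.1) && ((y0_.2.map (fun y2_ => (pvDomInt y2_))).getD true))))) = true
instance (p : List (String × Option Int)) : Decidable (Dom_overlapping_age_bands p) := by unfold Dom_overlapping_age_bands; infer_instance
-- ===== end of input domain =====

-- B replaces A's per-band overlap scan by closed-form index arithmetic (ceil/floor division)
-- plus one list slice; objective: alternative (same asymptotic cost on this fixed band table).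

-- ===== PORT A =====
-- A's loop over the bands dict, in insertion order (values are ints, so int() is the identity
-- and the try/except never fires on the typed domain).
def pvBandLoop (amin amax : Int) : List String :=
  [("0-2 yr", (0:Int), (2:Int)), ("3-5 yr", 3, 5), ("6-8 yr", 6, 8), ("9-11 yr", 9, 11)].foldl
    (fun out kv => if ¬ (amax < kv.2.1 ∨ amin > kv.2.2) then out ++ [kv.1] else out) []

def overlapping_age_bands (p : List (String × Option Int)) : List String :=
  let am := ((PySem.Dict.mk p).get? "age_min").join
  let ax := ((PySem.Dict.mk p).get? "age_max").join
  if am = none ∧ ax = none then []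
  else
    let amin := am.getD 0
    let amax := ax.getD amin
    if amax < amin then pvBandLoop amax amin else pvBandLoop amin amax

-- ===== PORT B =====
-- B's arithmetic: lowest overlapping band index by ceiling division, highest by floor division,
-- then one slice of the name list.
def pvBandSlice (amin amax : Int) : List String :=
  let names := ["0-2 yr", "3-5 yr", "6-8 yr", "9-11 yr"]
  let loIdx : Int := max 0 (-(PySem.Int.floordiv (-(amin - 2)) 3))
  let hiIdx : Int := min 3 (PySem.Int.floordiv amax 3)
  if loIdx ≤ hiIdx then PySem.List.slice names (some loIdx) (some (hiIdx + 1)) else []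

def overlapping_age_bands_alt (p : List (String × Option Int)) : List String :=
  let am := ((PySem.Dict.mk p).get? "age_min").join
  let ax := ((PySem.Dict.mk p).get? "age_max").join
  if am = none ∧ ax = none then []
  else
    let amin := am.getD 0
    let amax := ax.getD amin
    if amax < amin then pvBandSlice amax amin else pvBandSlice amin amax

-- ===== PRECONDITION & SPEC =====
def Spec_overlapping_age_bands (p : List (String × Option Int)) (out : List String) : Prop := out = overlapping_age_bands_alt p
instance (p : List (String × Option Int)) (out : List String) : Decidable (Spec_overlapping_age_bands p out) := by unfold Spec_overlapping_age_bands; infer_instance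

-- ===== CLAIM (what is proved, stated in full; the proofs are below) =====
def Claim_equal_overlapping_age_bands : Prop := ∀ (p : List (String × Option Int)), Dom_overlapping_age_bands p → Spec_overlapping_age_bands p (overlapping_age_bands p)

-- ===== LEMMAS AND PROOFS =====

lemma pvCore_eq (a b : Int) (h : a ≤ b) : pvBandLoop a b = pvBandSlice a b := by
  unfold pvBandLoop pvBandSlice
  rw [PySem.Int.floordiv_eq_ediv_of_pos (by norm_num), PySem.Int.floordiv_eq_ediv_of_pos (by norm_num)]
  simp only [List.foldl]
  rcases (by omega : max 0 (-(-(a - 2) / 3)) = 0 ∨ max 0 (-(-(a - 2) / 3)) = 1 ∨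
      max 0 (-(-(a - 2) / 3)) = 2 ∨ max 0 (-(-(a - 2) / 3)) = 3 ∨ 4 ≤ max 0 (-(-(a - 2) / 3))) with hM | hM | hM | hM | hM <;>
    rcases (by omega : min 3 (b / 3) ≤ -1 ∨ min 3 (b / 3) = 0 ∨ min 3 (b / 3) = 1 ∨
        min 3 (b / 3) = 2 ∨ min 3 (b / 3) = 3) with hN | hN | hN | hN | hN <;>
    first
    | (rw [hM, hN]; norm_num [PySem.List.slice, PySem.List.clampIdx];
       split_ifs <;> first | rfl | (exfalso; omega))
    | (rw [hM]; rw [if_neg (by omega)];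
       split_ifs <;> first | rfl | (exfalso; omega))
    | (rw [if_neg (by omega)]; split_ifs <;> first | rfl | (exfalso; omega))

-- ===== VERDICT (by name: the statement is the Claim_ definition above) =====
theorem overlapping_age_bands_spec : Claim_equal_overlapping_age_bands := by
  intro p _
  unfold Spec_overlapping_age_bands overlapping_age_bands overlapping_age_bands_alt
  cases h1 : ((PySem.Dict.mk p).get? "age_min").join <;>
    cases h2 : ((PySem.Dict.mk p).get? "age_max").join <;>
    simp only [Option.getD] <;>
    split_ifs <;> first | rfl | (apply pvCore_eq; omega)
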